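-- pv_equiv track=rewrite | github.com/seongwon-bae/dinco-codingtest-codes | 1st_week/01_string_reverse.py | number_reverse
-- ===== SOURCE A (Python) =====
-- def number_reverse(string, num):
--     count = 0
--     first_index = -1
--     for index in range(len(string)):
--         if first_index > -1:
--             if string[index] == str(num):
--                 count += 1
--                 first_index = -1
--             else:
--                 continue
--         else:
--             if string[index] == str(num):
--                 continue
--             else:
--                 first_index = index
--     return count
-- ===== SOURCE B (Python) =====
-- def number_reverse(string, num):
--     d = str(num)
--     return sum(1 for prev, cur in zip(string, string[1:]) if cur == d and prev != d)
-- ===== Notes on version B (the rewrite author's own statement) =====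
-- stated objective: simpler
-- what changed: Replaces A's count/first_index state machine over indices with a stateless one-liner that counts adjacent pairs (prev, cur) with cur == str(num) and prev != str(num), via zip of the string with its tail.
import Mathlib
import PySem

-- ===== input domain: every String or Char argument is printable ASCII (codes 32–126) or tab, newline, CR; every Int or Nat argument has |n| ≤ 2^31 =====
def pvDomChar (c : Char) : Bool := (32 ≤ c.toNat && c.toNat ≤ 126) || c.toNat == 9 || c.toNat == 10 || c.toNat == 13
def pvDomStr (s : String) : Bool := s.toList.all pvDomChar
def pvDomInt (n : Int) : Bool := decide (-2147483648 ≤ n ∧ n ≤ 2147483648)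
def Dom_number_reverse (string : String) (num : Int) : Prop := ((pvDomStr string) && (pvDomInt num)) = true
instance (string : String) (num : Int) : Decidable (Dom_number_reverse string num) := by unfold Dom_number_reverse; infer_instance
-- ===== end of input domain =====

-- B replaces A's count/first_index state machine with a stateless count of adjacent
-- pairs (prev, cur) with cur == str(num) and prev != str(num): simpler, same O(n) cost.

-- ===== PORT A =====
-- Python's 1-char string string[index] is represented as the Char list [c]; str(num) as
-- (PySem.Int.toStr num).toList, so the '==' comparison is exact.
def number_reverse (string : String) (num : Int) : Int :=
  let s := string.toList
  let d := (PySem.Int.toStr num).toList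
  ((PySem.List.pyRange 0 (s.length : Int) 1).foldl
    (fun (st : Int × Int) index =>
      if st.2 > -1 then
        if (PySem.List.pyGet? s index).map (fun c => [c]) = some d then (st.1 + 1, -1)
        else st
      else
        if (PySem.List.pyGet? s index).map (fun c => [c]) = some d then st
        else (st.1, index))
    (0, -1)).1

-- ===== PORT B =====
-- zip(string, string[1:]); the generator-sum is the foldl with an if.
def number_reverse_alt (string : String) (num : Int) : Int :=
  let d := (PySem.Int.toStr num).toList
  let s := string.toList
  (s.zip (PySem.List.slice s (some 1) none)).foldl
    (fun acc pc => if [pc.2] = d ∧ [pc.1] ≠ d then acc + 1 else acc) 0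

-- ===== PRECONDITION & SPEC =====
def Spec_number_reverse (string : String) (num : Int) (out : Int) : Prop := out = number_reverse_alt string num
instance (string : String) (num : Int) (out : Int) : Decidable (Spec_number_reverse string num out) := by unfold Spec_number_reverse; infer_instance

-- ===== CLAIM (what is proved, stated in full; the proofs are below) =====
def Claim_equal_number_reverse : Prop := ∀ (string : String) (num : Int), Dom_number_reverse string num → Spec_number_reverse string num (number_reverse string num)

-- ===== LEMMAS AND PROOFS =====

-- does the char c (as a 1-char Python string) equal str(num)?
def pvMch (d : List Char) (c : Char) : Bool := decide ([c] = d)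

-- common abstraction of both loops: count chars matching d whose "armed" flag
-- (some non-matching char seen since the last hit; i.e. previous char non-matching) is set.
def pvPC (d : List Char) : Bool → List Char → Int
  | _, [] => 0
  | a, c :: r => (if a && pvMch d c then 1 else 0) + pvPC d (!pvMch d c) r

lemma pv_loopA (s d : List Char) :
    ∀ (t : List Char) (i k fi : Int), 0 ≤ i → s.drop i.toNat = t →
    (((PySem.List.pyRange i (s.length : Int) 1).foldl
      (fun (st : Int × Int) index =>
        if st.2 > -1 then
          if (PySem.List.pyGet? s index).map (fun c => [c]) = some d then (st.1 + 1, -1)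
          else st
        else
          if (PySem.List.pyGet? s index).map (fun c => [c]) = some d then st
          else (st.1, index))
      (k, fi)).1) = k + pvPC d (decide (fi > -1)) t := by
  intro t
  induction t with
  | nil =>
    intro i k fi h0 hdrop
    have hle : s.length ≤ i.toNat := List.drop_eq_nil_iff.mp hdrop
    rw [PySem.List.pyRange_one_eq_nil (by omega)]
    simp [pvPC]
  | cons c t' ih =>
    intro i k fi h0 hdrop
    have hlen : s.length - i.toNat = t'.length + 1 := by
      have := congrArg List.length hdrop
      simpa using this
    have hlt : (i : Int) < (s.length : Int) := by omega
    have hget : PySem.List.pyGet? s i = some c := by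
      rw [PySem.List.pyGet?_of_nonneg s h0, ← List.head?_drop, hdrop]
      rfl
    have hdrop' : s.drop (i + 1).toNat = t' := by
      have h1 : (i + 1).toNat = i.toNat + 1 := by omega
      rw [h1, ← List.drop_drop, hdrop]
      rfl
    rw [PySem.List.pyRange_one_cons hlt]
    simp only [List.foldl_cons, hget, Option.map_some]
    by_cases hc : [c] = d
    · by_cases hfi : fi > -1
      · simp only [if_pos hfi]
        rw [hc, if_pos rfl]
        rw [ih (i + 1) (k + 1) (-1) (by omega) hdrop']
        simp [pvPC, pvMch, hc, hfi]
        ring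
      · simp only [if_neg hfi]
        rw [hc, if_pos rfl]
        rw [ih (i + 1) k fi (by omega) hdrop']
        simp [pvPC, pvMch, hc, hfi]
    · by_cases hfi : fi > -1
      · simp only [if_pos hfi]
        rw [if_neg (show ¬ (some [c] = some d) by simpa using hc)]
        rw [ih (i + 1) k fi (by omega) hdrop']
        simp [pvPC, pvMch, hc, hfi]
      · simp only [if_neg hfi]
        rw [if_neg (show ¬ (some [c] = some d) by simpa using hc)]
        rw [ih (i + 1) k i (by omega) hdrop']
        have : decide ((i : Int) > -1) = true := by simp; omega
        simp [pvPC, pvMch, hc, hfi, this]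

lemma pv_loopB (d : List Char) :
    ∀ (t : List Char) (prev : Char) (acc : Int),
    ((prev :: t).zip t).foldl
      (fun acc pc => if [pc.2] = d ∧ [pc.1] ≠ d then acc + 1 else acc) acc
    = acc + pvPC d (!pvMch d prev) t := by
  intro t
  induction t with
  | nil => intro prev acc; simp [pvPC]
  | cons c r ih =>
    intro prev acc
    simp only [List.zip_cons_cons, List.foldl_cons]
    rw [ih c]
    by_cases hc : [c] = d
    · by_cases hp : [prev] = d
      · simp [pvPC, pvMch, hc, hp]
      · simp [pvPC, pvMch, hc, hp]
        ring
    · by_cases hp : [prev] = d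
      · simp [pvPC, pvMch, hc, hp]
      · simp [pvPC, pvMch, hc, hp]

-- ===== VERDICT (by name: the statement is the Claim_ definition above) =====
theorem number_reverse_spec : Claim_equal_number_reverse := by
  intro string num _
  unfold Spec_number_reverse number_reverse number_reverse_alt
  dsimp only
  rw [PySem.List.slice_from_one]
  rw [pv_loopA string.toList ((PySem.Int.toStr num).toList) string.toList 0 0 (-1)
      (by omega) (by simp)]
  cases h : string.toList with
  | nil => simp [pvPC]
  | cons c t =>
    simp only [List.tail_cons]
    rw [pv_loopB _ t c 0]
    simp [pvPC]
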